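-- pv_equiv track=rewrite | github.com/AlbertoRivadulla/Advent-of-Code | 2021/09_Smoke_basin/main.py | countHigherNeighbors
-- ===== SOURCE A (Python) =====
-- heightmap = []
--
-- def findUnvisitedNeighbors(heightmap, visited, point):
--     # Create the tentative list of neighbors
--     tentativeNeighbors = [ [ point[0] - 1, point[1] ],
--                          [ point[0], point[1] - 1 ],
--                          [ point[0], point[1] + 1 ],
--                          [ point[0] + 1, point[1] ] ]
--     # Return only the valid neighbors
--     neighbors = []
--     for neigh in tentativeNeighbors:
--         if neigh[0] < 0 or neigh[0] >= len(heightmap):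
--             continue
--         if neigh[1] < 0 or neigh[1] >= len(heightmap[0]):
--             continue
--         if visited[neigh[0]][neigh[1]] == 1:
--             continue
--         neighbors.append(neigh)
--     return neighbors
--
-- def countHigherNeighbors(heightmap, visited, point):
--     # Find the unvisited neighbors
--     tentativeNeighbors = findUnvisitedNeighbors(heightmap, visited, point)
--     # Get the height of the current neighbor
--     pointHeight = heightmap[point[0]][point[1]]
--
--     # Check that the neighbors are higher than the current point, but not at a
--     # height of 9
--     validNeighbors = []
--     for neigh in tentativeNeighbors:
--         if heightmap[neigh[0]][neigh[1]] == 9: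
--             continue
--         if heightmap[neigh[0]][neigh[1]] < pointHeight:
--             continue
--         validNeighbors.append(neigh)
--
--     # Counter with the number of neighbors
--     nrNeighbors = len(validNeighbors)
--
--     # If there are no more valid neighbors, return the number of them
--     if nrNeighbors == 0:
--         return 0
--
--     # Mark each neighbor as visited
--     for neigh in validNeighbors:
--         visited[neigh[0]][neigh[1]] = 1
--
--     # Add to the counter the neighbors of each neighbor
--     for neigh in validNeighbors:
--         nrNeighbors += countHigherNeighbors(heightmap, visited, neigh)
--
--     return nrNeighbors
--
-- visited = [ [ 0 for i in range(len(heightmap[0])) ] for j in range(len(heightmap)) ]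
-- ===== SOURCE B (Python) =====
-- def countHigherNeighbors(heightmap, visited, point):
--     # Iterative flood fill with an explicit stack instead of recursion.
--     # Like A, it mutates `visited` in place (marks every counted cell).
--     rows = len(heightmap)
--     total = 0
--     stack = [[point[0], point[1]]]
--     while stack:
--         cur = stack.pop()
--         height = heightmap[cur[0]][cur[1]]
--         # scan in reverse of A's neighbor order so the LIFO pop order
--         # matches A's depth-first order
--         for nb in [[cur[0] + 1, cur[1]], [cur[0], cur[1] + 1],
--                    [cur[0], cur[1] - 1], [cur[0] - 1, cur[1]]]:
--             if 0 <= nb[0] < rows and 0 <= nb[1] < len(heightmap[0]) \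
--                     and visited[nb[0]][nb[1]] != 1 \
--                     and heightmap[nb[0]][nb[1]] != 9 \
--                     and heightmap[nb[0]][nb[1]] >= height:
--                 total += 1
--                 visited[nb[0]][nb[1]] = 1
--                 stack.append(nb)
--     return total
-- ===== Notes on version B (the rewrite author's own statement) =====
-- stated objective: idiomatic
-- what changed: A's recursive flood fill (per call: build unvisited-neighbor list, second filter pass, batch-mark, then recurse on each neighbor) is replaced by an iterative explicit-stack loop with a single-pass neighbor test that counts and marks each cell at discovery. Pre_ additionally requires a rectangular heightmap with visited covering its full extent: on ragged or undersized shapes A raises unless the mismatched cells happen to be unreachable, a reachability condition with no closed form, so those lucky-shape inputs (on which B agrees with A anyway) are excluded.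
-- outside the precondition, e.g. on countHigherNeighbors([[9], [1, 2]], [[0], [0, 0]], [0, 0]): A returns 0, B returns 0; on countHigherNeighbors([[9, 3]], [[0]], [0, 1]): A returns 0, B returns 0
import Mathlib
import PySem

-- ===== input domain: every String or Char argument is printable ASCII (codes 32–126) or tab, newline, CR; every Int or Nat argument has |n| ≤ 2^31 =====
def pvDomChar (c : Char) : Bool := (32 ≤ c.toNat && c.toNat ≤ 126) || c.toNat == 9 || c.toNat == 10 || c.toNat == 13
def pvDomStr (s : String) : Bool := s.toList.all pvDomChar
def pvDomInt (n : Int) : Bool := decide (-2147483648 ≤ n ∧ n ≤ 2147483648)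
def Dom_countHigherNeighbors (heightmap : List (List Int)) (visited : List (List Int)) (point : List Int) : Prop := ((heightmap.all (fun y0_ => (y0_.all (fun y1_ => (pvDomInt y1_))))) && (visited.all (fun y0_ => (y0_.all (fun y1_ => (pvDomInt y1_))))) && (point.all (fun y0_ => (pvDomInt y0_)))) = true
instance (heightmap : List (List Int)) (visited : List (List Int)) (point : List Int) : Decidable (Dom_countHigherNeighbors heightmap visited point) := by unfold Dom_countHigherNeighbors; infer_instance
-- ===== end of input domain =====

-- B replaces A's recursive flood fill by an iterative explicit-stack loop with a
-- single-pass neighbor test (objective: idiomatic).  Both Pythons mutate `visited`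
-- identically (they mark the same cells); the equivalence proved here is about the
-- return value.

-- ===== shared low-level helpers (Python indexing / assignment / a termination measure) =====

-- grid[i][j] as Python reads it (negative i wraps; both programs only read in-range cells under Pre_)
def pvGet2 (g : List (List Int)) (i j : Int) : Int :=
  (PySem.List.pyGet? ((PySem.List.pyGet? g i).getD []) j).getD 0

-- row with row[j] = 1; exact for the non-negative in-range j at which the Pythons write
def pvSetRow : List Int → Int → List Int
  | [], _ => []
  | x :: xs, j => if j = 0 then 1 :: xs else x :: pvSetRow xs (j - 1)

-- visited[i][j] = 1; exact for the non-negative in-range (i, j) at which the Pythons write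
def pvSetv : List (List Int) → Int → Int → List (List Int)
  | [], _, _ => []
  | r :: rs, i, j => if i = 0 then pvSetRow r j :: rs else r :: pvSetv rs (i - 1) j

-- number of not-yet-visited entries: the fuel bound for both ports (each discovery marks one)
def pvCnt (r : List Int) : Nat := (r.filter (fun x => !(x == 1))).length
def pvMu : List (List Int) → Nat
  | [] => 0
  | r :: rs => pvCnt r + pvMu rs

-- ===== PORT A =====

-- A's helper: the four candidate neighbors, kept if in bounds and unvisited
def findUnvisitedNeighbors (heightmap visited : List (List Int)) (p : Int × Int) : List (Int × Int) :=
  [(p.1 - 1, p.2), (p.1, p.2 - 1), (p.1, p.2 + 1), (p.1 + 1, p.2)].filter (fun n =>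
    if n.1 < 0 || (heightmap.length : Int) ≤ n.1 then false
    else if n.2 < 0 || ((heightmap.headD []).length : Int) ≤ n.2 then false
    else if pvGet2 visited n.1 n.2 == 1 then false
    else true)

-- A's recursion, with fuel (pvMu visited + 1 is enough wherever the Python returns;
-- outside Pre_ the Python raises); state = (count, visited)
def chnA : Nat → List (List Int) → List (List Int) → Int × Int → Int × List (List Int)
  | 0, _, v, _ => (0, v)
  | f + 1, hm, v, p =>
    let tent := findUnvisitedNeighbors hm v p
    let ph := pvGet2 hm p.1 p.2
    let valid := tent.filter (fun n =>
      if pvGet2 hm n.1 n.2 == 9 then false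
      else if pvGet2 hm n.1 n.2 < ph then false
      else true)
    if valid.isEmpty then (0, v)
    else
      let v1 := valid.foldl (fun w n => pvSetv w n.1 n.2) v
      valid.foldl (fun acc n =>
        let r := chnA f hm acc.2 n
        (acc.1 + r.1, r.2)) ((valid.length : Int), v1)

def countHigherNeighbors (heightmap : List (List Int)) (visited : List (List Int)) (point : List Int) : Int :=
  (chnA (pvMu visited + 1) heightmap visited
    ((PySem.List.pyGet? point 0).getD 0, (PySem.List.pyGet? point 1).getD 0)).1

-- ===== PORT B =====

-- B's single-pass neighbor test: in bounds, unvisited, not 9, at least as high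
def pvBTest (hm w : List (List Int)) (h : Int) (n : Int × Int) : Bool :=
  decide (0 ≤ n.1) && decide (n.1 < (hm.length : Int)) &&
  decide (0 ≤ n.2) && decide (n.2 < ((hm.headD []).length : Int)) &&
  !(pvGet2 w n.1 n.2 == 1) && !(pvGet2 hm n.1 n.2 == 9) && decide (h ≤ pvGet2 hm n.1 n.2)

-- B's while-loop, with the same fuel bound; the stack top is the list head
-- (Python appends and pops at the end); state = (count, visited, stack)
def chnB : Nat → List (List Int) → Int → List (List Int) → List (Int × Int) → Int
  | 0, _, total, _, _ => total
  | f + 1, hm, total, v, stack =>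
    match stack with
    | [] => total
    | cur :: rest =>
      let h := pvGet2 hm cur.1 cur.2
      let s := [(cur.1 + 1, cur.2), (cur.1, cur.2 + 1), (cur.1, cur.2 - 1), (cur.1 - 1, cur.2)].foldl
        (fun (s : Int × List (List Int) × List (Int × Int)) nb =>
          if pvBTest hm s.2.1 h nb then (s.1 + 1, pvSetv s.2.1 nb.1 nb.2, nb :: s.2.2) else s)
        (total, v, rest)
      chnB f hm s.1 s.2.1 s.2.2

def countHigherNeighbors_alt (heightmap : List (List Int)) (visited : List (List Int)) (point : List Int) : Int :=
  chnB (pvMu visited + 1) heightmap 0 visited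
    [((PySem.List.pyGet? point 0).getD 0, (PySem.List.pyGet? point 1).getD 0)]

-- ===== PRECONDITION & SPEC =====

-- Pre_ = the start point has two in-range (possibly negative, Python-wrapping) coordinates,
-- the heightmap is nonempty and rectangular, and visited covers its full extent.
-- This is narrower than "A returns": on ragged or undersized shapes A raises unless the
-- mismatched cells happen to be unreachable — a reachability condition with no closed form —
-- so such lucky-shape inputs (on which B agrees with A anyway) are excluded.
def Pre_countHigherNeighbors (heightmap : List (List Int)) (visited : List (List Int)) (point : List Int) : Prop :=
  2 ≤ point.length ∧ heightmap ≠ [] ∧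
  (∀ row ∈ heightmap, row.length = (heightmap.headD []).length) ∧
  heightmap.length ≤ visited.length ∧
  (∀ row ∈ visited, (heightmap.headD []).length ≤ row.length) ∧
  -(heightmap.length : Int) ≤ (PySem.List.pyGet? point 0).getD 0 ∧
  (PySem.List.pyGet? point 0).getD 0 < (heightmap.length : Int) ∧
  -((heightmap.headD []).length : Int) ≤ (PySem.List.pyGet? point 1).getD 0 ∧
  (PySem.List.pyGet? point 1).getD 0 < ((heightmap.headD []).length : Int)

instance (heightmap : List (List Int)) (visited : List (List Int)) (point : List Int) : Decidable (Pre_countHigherNeighbors heightmap visited point) := by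
  unfold Pre_countHigherNeighbors; infer_instance

def pvWitness_countHigherNeighbors : List (List Int) × List (List Int) × List Int :=
  ([[1, 2], [9, 3]], [[0, 0], [0, 0]], [0, 0])

def Spec_countHigherNeighbors (heightmap : List (List Int)) (visited : List (List Int)) (point : List Int) (out : Int) : Prop := out = countHigherNeighbors_alt heightmap visited point
instance (heightmap : List (List Int)) (visited : List (List Int)) (point : List Int) (out : Int) : Decidable (Spec_countHigherNeighbors heightmap visited point out) := by unfold Spec_countHigherNeighbors; infer_instance

-- ===== CLAIM (what is proved, stated in full; the proofs are below) =====
def Claim_equal_countHigherNeighbors : Prop := ∀ (heightmap : List (List Int)) (visited : List (List Int)) (point : List Int), Dom_countHigherNeighbors heightmap visited point → Pre_countHigherNeighbors heightmap visited point → Spec_countHigherNeighbors heightmap visited point (countHigherNeighbors heightmap visited point)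

-- ===== LEMMAS AND PROOFS =====

-- shape invariant threaded through the recursion
def pvShape (hm v : List (List Int)) : Prop :=
  hm.length ≤ v.length ∧ (∀ row ∈ v, (hm.headD []).length ≤ row.length)

theorem pvPyGetCons {α : Type} (x : α) (xs : List α) (b : Int) (hb : 0 ≤ b) :
    PySem.List.pyGet? (x :: xs) b = if b = 0 then some x else PySem.List.pyGet? xs (b - 1) := by
  rw [PySem.List.pyGet?_of_nonneg (x :: xs) hb]
  split
  · subst_vars; rfl
  · rw [PySem.List.pyGet?_of_nonneg xs (i := b - 1) (by omega)]
    have : b.toNat = (b - 1).toNat + 1 := by omega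
    rw [this]
    simp

theorem pvSetRow_length (r : List Int) (j : Int) : (pvSetRow r j).length = r.length := by
  induction r generalizing j with
  | nil => rfl
  | cons x xs ih => simp only [pvSetRow]; split <;> simp [ih]

theorem pvSetv_length (v : List (List Int)) (i j : Int) : (pvSetv v i j).length = v.length := by
  induction v generalizing i with
  | nil => rfl
  | cons r rs ih => simp only [pvSetv]; split <;> simp [ih]

theorem pvSetRow_cons_zero (x : Int) (xs : List Int) : pvSetRow (x :: xs) 0 = 1 :: xs := by
  simp [pvSetRow]

theorem pvSetRow_cons_ne (x : Int) (xs : List Int) (j : Int) (h : j ≠ 0) :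
    pvSetRow (x :: xs) j = x :: pvSetRow xs (j - 1) := by
  simp [pvSetRow, h]

theorem pvSetv_cons_zero (r : List Int) (rs : List (List Int)) (j : Int) :
    pvSetv (r :: rs) 0 j = pvSetRow r j :: rs := by
  simp [pvSetv]

theorem pvSetv_cons_ne (r : List Int) (rs : List (List Int)) (i j : Int) (h : i ≠ 0) :
    pvSetv (r :: rs) i j = r :: pvSetv rs (i - 1) j := by
  simp [pvSetv, h]

theorem pvMu_cons (r : List Int) (rs : List (List Int)) : pvMu (r :: rs) = pvCnt r + pvMu rs := rfl

theorem pvCnt_cons (x : Int) (xs : List Int) :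
    pvCnt (x :: xs) = (if x = 1 then 0 else 1) + pvCnt xs := by
  simp only [pvCnt, List.filter_cons]
  by_cases h : x = 1
  · simp [h]
  · simp [h, Nat.add_comm]

theorem pvRowGet_setRow_ne (r : List Int) (j b : Int) (hj : 0 ≤ j) (hb : 0 ≤ b) (hne : b ≠ j) :
    (PySem.List.pyGet? (pvSetRow r j) b).getD 0 = (PySem.List.pyGet? r b).getD 0 := by
  induction r generalizing j b with
  | nil => rfl
  | cons x xs ih =>
    by_cases hj0 : j = 0
    · subst hj0
      rw [pvSetRow_cons_zero, pvPyGetCons _ _ _ hb, pvPyGetCons _ _ _ hb, if_neg hne, if_neg hne]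
    · rw [pvSetRow_cons_ne _ _ _ hj0, pvPyGetCons _ _ _ hb, pvPyGetCons _ _ _ hb]
      by_cases hb0 : b = 0
      · rw [if_pos hb0, if_pos hb0]
      · rw [if_neg hb0, if_neg hb0]
        exact ih (j - 1) (b - 1) (by omega) (by omega) (by omega)

theorem pvGet2_setv_ne (v : List (List Int)) (i j a b : Int)
    (hi : 0 ≤ i) (hj : 0 ≤ j) (ha : 0 ≤ a) (hb : 0 ≤ b) (hne : (a, b) ≠ (i, j)) :
    pvGet2 (pvSetv v i j) a b = pvGet2 v a b := by
  induction v generalizing i a with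
  | nil => rfl
  | cons r rs ih =>
    by_cases hi0 : i = 0
    · subst hi0
      rw [pvSetv_cons_zero]
      unfold pvGet2
      rw [pvPyGetCons _ _ _ ha, pvPyGetCons _ _ _ ha]
      by_cases ha0 : a = 0
      · have hbj : b ≠ j := by simp only [ne_eq, Prod.mk.injEq] at hne; omega
        rw [if_pos ha0, if_pos ha0]
        simp only [Option.getD_some]
        exact pvRowGet_setRow_ne r j b hj hb hbj
      · rw [if_neg ha0, if_neg ha0]
    · rw [pvSetv_cons_ne _ _ _ _ hi0]
      unfold pvGet2
      rw [pvPyGetCons _ _ _ ha, pvPyGetCons _ _ _ ha]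
      by_cases ha0 : a = 0
      · rw [if_pos ha0, if_pos ha0]
      · rw [if_neg ha0, if_neg ha0]
        have hne' : (a - 1, b) ≠ (i - 1, j) := by
          simp only [ne_eq, Prod.mk.injEq] at hne ⊢; omega
        exact ih (i - 1) (a - 1) (by omega) (by omega) hne'

theorem pvCnt_setRow_le (r : List Int) (j : Int) : pvCnt (pvSetRow r j) ≤ pvCnt r := by
  induction r generalizing j with
  | nil => simp [pvSetRow]
  | cons x xs ih =>
    by_cases hj0 : j = 0
    · subst hj0
      rw [pvSetRow_cons_zero, pvCnt_cons, pvCnt_cons]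
      split <;> split <;> omega
    · rw [pvSetRow_cons_ne _ _ _ hj0, pvCnt_cons, pvCnt_cons]
      have := ih (j - 1); omega

theorem pvCnt_setRow_lt (r : List Int) (j : Int) (hj : 0 ≤ j) (hjl : j < (r.length : Int))
    (hval : (PySem.List.pyGet? r j).getD 0 ≠ 1) : pvCnt (pvSetRow r j) < pvCnt r := by
  induction r generalizing j with
  | nil => simp at hjl; omega
  | cons x xs ih =>
    rw [pvPyGetCons _ _ _ hj] at hval
    by_cases hj0 : j = 0
    · rw [if_pos hj0] at hval
      simp only [Option.getD_some] at hval
      subst hj0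
      rw [pvSetRow_cons_zero, pvCnt_cons, pvCnt_cons, if_pos rfl, if_neg hval]
      omega
    · rw [if_neg hj0] at hval
      rw [pvSetRow_cons_ne _ _ _ hj0, pvCnt_cons, pvCnt_cons]
      have := ih (j - 1) (by omega) (by simp at hjl ⊢; omega) hval
      omega

theorem pvMu_setv_le (v : List (List Int)) (i j : Int) : pvMu (pvSetv v i j) ≤ pvMu v := by
  induction v generalizing i with
  | nil => simp [pvSetv]
  | cons r rs ih =>
    by_cases hi0 : i = 0
    · subst hi0
      rw [pvSetv_cons_zero, pvMu_cons, pvMu_cons]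
      have := pvCnt_setRow_le r j; omega
    · rw [pvSetv_cons_ne _ _ _ _ hi0, pvMu_cons, pvMu_cons]
      have := ih (i - 1); omega

theorem pvMu_setv_lt (v : List (List Int)) (i j : Int)
    (hi : 0 ≤ i) (hiv : i < (v.length : Int)) (hj : 0 ≤ j)
    (hjr : j < ((((PySem.List.pyGet? v i).getD [])).length : Int))
    (hval : pvGet2 v i j ≠ 1) : pvMu (pvSetv v i j) < pvMu v := by
  induction v generalizing i with
  | nil => simp at hiv; omega
  | cons r rs ih =>
    unfold pvGet2 at hval
    rw [pvPyGetCons _ _ _ hi] at hval hjr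
    by_cases hi0 : i = 0
    · rw [if_pos hi0] at hval hjr
      simp only [Option.getD_some] at hval hjr
      subst hi0
      rw [pvSetv_cons_zero, pvMu_cons, pvMu_cons]
      have := pvCnt_setRow_lt r j hj hjr hval
      omega
    · rw [if_neg hi0] at hval hjr
      rw [pvSetv_cons_ne _ _ _ _ hi0, pvMu_cons, pvMu_cons]
      have := ih (i - 1) (by omega) (by simp at hiv ⊢; omega) hjr hval
      omega

theorem pvSetv_mem_len (v : List (List Int)) (i j : Int) (row : List Int)
    (h : row ∈ pvSetv v i j) : ∃ r ∈ v, row.length = r.length := by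
  induction v generalizing i with
  | nil => simp [pvSetv] at h
  | cons r rs ih =>
    by_cases hi0 : i = 0
    · rw [hi0, pvSetv_cons_zero] at h
      rcases List.mem_cons.mp h with h | h
      · exact ⟨r, by simp, by simp [h, pvSetRow_length]⟩
      · exact ⟨row, by simp [h], rfl⟩
    · rw [pvSetv_cons_ne _ _ _ _ hi0] at h
      rcases List.mem_cons.mp h with h | h
      · exact ⟨r, by simp, by simp [h]⟩
      · obtain ⟨r', hr', hl⟩ := ih (i - 1) h
        exact ⟨r', by simp [hr'], hl⟩

theorem pvShape_setv (hm v : List (List Int)) (i j : Int) (h : pvShape hm v) :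
    pvShape hm (pvSetv v i j) := by
  refine ⟨by rw [pvSetv_length]; exact h.1, ?_⟩
  intro row hrow
  obtain ⟨r, hr, hl⟩ := pvSetv_mem_len v i j row hrow
  rw [hl]
  exact h.2 r hr

theorem pvBTest_congr (hm w w' : List (List Int)) (h : Int) (n : Int × Int)
    (hg : 0 ≤ n.1 → 0 ≤ n.2 → pvGet2 w' n.1 n.2 = pvGet2 w n.1 n.2) :
    pvBTest hm w' h n = pvBTest hm w h n := by
  unfold pvBTest
  by_cases h1 : 0 ≤ n.1
  · by_cases h3 : 0 ≤ n.2
    · rw [hg h1 h3]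
    · simp [h3]
  · simp [h1]

theorem pvBTest_nonneg (hm w : List (List Int)) (h : Int) (n : Int × Int)
    (ht : pvBTest hm w h n = true) : 0 ≤ n.1 ∧ 0 ≤ n.2 := by
  simp only [pvBTest, Bool.and_eq_true, decide_eq_true_eq] at ht
  exact ⟨ht.1.1.1.1.1.1, ht.1.1.1.1.2⟩

theorem pvBTest_facts (hm w : List (List Int)) (h : Int) (n : Int × Int)
    (ht : pvBTest hm w h n = true) :
    0 ≤ n.1 ∧ n.1 < (hm.length : Int) ∧ 0 ≤ n.2 ∧ n.2 < ((hm.headD []).length : Int) ∧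
      pvGet2 w n.1 n.2 ≠ 1 := by
  simp only [pvBTest, Bool.and_eq_true, decide_eq_true_eq, Bool.not_eq_true',
    beq_eq_false_iff_ne, ne_eq] at ht
  exact ⟨ht.1.1.1.1.1.1, ht.1.1.1.1.1.2, ht.1.1.1.1.2, ht.1.1.1.2, ht.1.1.2⟩

-- accepted cells are genuinely unvisited and in range, so marking them shrinks the measure
theorem pvMu_mark_lt (hm w : List (List Int)) (h : Int) (n : Int × Int)
    (hs : pvShape hm w) (ht : pvBTest hm w h n = true) :
    pvMu (pvSetv w n.1 n.2) < pvMu w := by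
  obtain ⟨h1, h2, h3, h4, h5⟩ := pvBTest_facts hm w h n ht
  have hlen : n.1 < (w.length : Int) := by
    have := hs.1; omega
  refine pvMu_setv_lt w n.1 n.2 h1 hlen h3 ?_ h5
  rw [PySem.List.pyGet?_eq_some_getElem w h1 hlen]
  have hmem : w[n.1.toNat] ∈ w := List.getElem_mem _
  have := hs.2 _ hmem
  simp only [Option.getD_some]
  omega

theorem pvSetRow_comm (r : List Int) (j b : Int) :
    pvSetRow (pvSetRow r j) b = pvSetRow (pvSetRow r b) j := by
  induction r generalizing j b with
  | nil => rfl
  | cons x xs ih =>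
    by_cases hj0 : j = 0 <;> by_cases hb0 : b = 0
    · rw [hj0, hb0]
    · rw [hj0, pvSetRow_cons_zero, pvSetRow_cons_ne _ _ _ hb0, pvSetRow_cons_ne _ _ _ hb0,
        pvSetRow_cons_zero]
    · rw [hb0, pvSetRow_cons_ne _ _ _ hj0, pvSetRow_cons_zero, pvSetRow_cons_zero,
        pvSetRow_cons_ne _ _ _ hj0]
    · rw [pvSetRow_cons_ne _ _ _ hj0, pvSetRow_cons_ne _ _ _ hb0, pvSetRow_cons_ne _ _ _ hb0,
        pvSetRow_cons_ne _ _ _ hj0, ih]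

theorem pvSetv_comm (w : List (List Int)) (i j a b : Int) :
    pvSetv (pvSetv w i j) a b = pvSetv (pvSetv w a b) i j := by
  induction w generalizing i a with
  | nil => rfl
  | cons r rs ih =>
    by_cases hi0 : i = 0 <;> by_cases ha0 : a = 0
    · rw [hi0, ha0, pvSetv_cons_zero, pvSetv_cons_zero, pvSetv_cons_zero, pvSetv_cons_zero,
        pvSetRow_comm]
    · rw [hi0, pvSetv_cons_zero, pvSetv_cons_ne _ _ _ _ ha0, pvSetv_cons_ne _ _ _ _ ha0,
        pvSetv_cons_zero]
    · rw [ha0, pvSetv_cons_ne _ _ _ _ hi0, pvSetv_cons_zero, pvSetv_cons_zero,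
        pvSetv_cons_ne _ _ _ _ hi0]
    · rw [pvSetv_cons_ne _ _ _ _ hi0, pvSetv_cons_ne _ _ _ _ ha0, pvSetv_cons_ne _ _ _ _ ha0,
        pvSetv_cons_ne _ _ _ _ hi0, ih]

def pvMark (qs : List (Int × Int)) (w : List (List Int)) : List (List Int) :=
  qs.foldl (fun w n => pvSetv w n.1 n.2) w

theorem pvMark_cons (q : Int × Int) (qs : List (Int × Int)) (w : List (List Int)) :
    pvMark (q :: qs) w = pvMark qs (pvSetv w q.1 q.2) := rfl

theorem pvMark_setv_comm (qs : List (Int × Int)) (w : List (List Int)) (i j : Int) :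
    pvMark qs (pvSetv w i j) = pvSetv (pvMark qs w) i j := by
  induction qs generalizing w with
  | nil => rfl
  | cons q qs ih => rw [pvMark_cons, pvMark_cons, pvSetv_comm, ih]

theorem pvMark_reverse (qs : List (Int × Int)) (w : List (List Int)) :
    pvMark qs.reverse w = pvMark qs w := by
  induction qs generalizing w with
  | nil => rfl
  | cons q qs ih =>
    rw [List.reverse_cons, pvMark, List.foldl_append]
    show pvSetv (pvMark qs.reverse w) q.1 q.2 = _
    rw [ih, ← pvMark_setv_comm, pvMark_cons]

theorem pvMu_mark_le (qs : List (Int × Int)) (w : List (List Int)) :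
    pvMu (pvMark qs w) ≤ pvMu w := by
  induction qs generalizing w with
  | nil => exact le_refl _
  | cons q qs ih =>
    rw [pvMark_cons]
    exact le_trans (ih _) (pvMu_setv_le w q.1 q.2)

theorem pvShape_mark (hm w : List (List Int)) (qs : List (Int × Int)) (hs : pvShape hm w) :
    pvShape hm (pvMark qs w) := by
  induction qs generalizing w with
  | nil => exact hs
  | cons q qs ih => exact ih _ (pvShape_setv hm w q.1 q.2 hs)

theorem pvMu_mark_le_of_all (hm w : List (List Int)) (h : Int) (qs : List (Int × Int))
    (hq : ∀ q ∈ qs, pvBTest hm w h q = true) (hp : qs.Pairwise (· ≠ ·)) (hs : pvShape hm w) :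
    pvMu (pvMark qs w) + qs.length ≤ pvMu w := by
  induction qs generalizing w with
  | nil => simp [pvMark]
  | cons q qs ih =>
    rw [pvMark_cons]
    have hq0 := hq q (by simp)
    have hlt := pvMu_mark_lt hm w h q hs hq0
    obtain ⟨hq1, hq2⟩ := pvBTest_nonneg hm w h q hq0
    rw [List.pairwise_cons] at hp
    have hq' : ∀ x ∈ qs, pvBTest hm (pvSetv w q.1 q.2) h x = true := by
      intro x hx
      have hcg : pvBTest hm (pvSetv w q.1 q.2) h x = pvBTest hm w h x := by
        apply pvBTest_congr
        intro hx1 hx2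
        refine pvGet2_setv_ne w q.1 q.2 x.1 x.2 hq1 hq2 hx1 hx2 ?_
        have hne2 := hp.1 x hx
        simp only [ne_eq, Prod.ext_iff] at hne2 ⊢
        intro hc
        exact hne2 ⟨hc.1.symm, hc.2.symm⟩
      rw [hcg]
      exact hq x (by simp [hx])
    have := ih (pvSetv w q.1 q.2) hq' hp.2 (pvShape_setv hm w q.1 q.2 hs)
    simp only [List.length_cons]
    omega

theorem pvT_pairwise (p : Int × Int) :
    ([(p.1 - 1, p.2), (p.1, p.2 - 1), (p.1, p.2 + 1), (p.1 + 1, p.2)] :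
      List (Int × Int)).Pairwise (· ≠ ·) := by
  refine List.pairwise_cons.mpr ⟨?_, List.pairwise_cons.mpr ⟨?_, List.pairwise_cons.mpr
    ⟨?_, List.pairwise_singleton _ _⟩⟩⟩
  · intro a' ha'
    rcases List.mem_cons.mp ha' with h | h
    · subst h; simp only [ne_eq, Prod.mk.injEq, not_and]; intro h2; omega
    rcases List.mem_cons.mp h with h | h
    · subst h; simp only [ne_eq, Prod.mk.injEq, not_and]; intro h2; omega
    · have ha2 : a' = (p.1 + 1, p.2) := by simpa using h
      subst ha2; simp only [ne_eq, Prod.mk.injEq, not_and]; intro h2; omega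
  · intro a' ha'
    rcases List.mem_cons.mp ha' with h | h
    · subst h; simp only [ne_eq, Prod.mk.injEq, not_and]; intro h2; omega
    · have ha2 : a' = (p.1 + 1, p.2) := by simpa using h
      subst ha2; simp only [ne_eq, Prod.mk.injEq, not_and]; intro h2; omega
  · intro a' ha'
    have ha2 : a' = (p.1 + 1, p.2) := by simpa using ha'
    subst ha2; simp only [ne_eq, Prod.mk.injEq, not_and]; intro h2; omega

-- B's inner for-loop over a duplicate-free candidate list, computed in closed form
theorem pvGVAL (hm : List (List Int)) (h : Int) (L : List (Int × Int))
    (hL : L.Pairwise (· ≠ ·)) (t : Int) (w : List (List Int)) (st : List (Int × Int)) :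
    L.foldl (fun (s : Int × List (List Int) × List (Int × Int)) nb =>
        if pvBTest hm s.2.1 h nb then (s.1 + 1, pvSetv s.2.1 nb.1 nb.2, nb :: s.2.2) else s)
      (t, w, st)
    = (t + ((L.filter (pvBTest hm w h)).length : Int),
       pvMark (L.filter (pvBTest hm w h)) w,
       (L.filter (pvBTest hm w h)).reverseAux st) := by
  induction L generalizing t w st with
  | nil => simp [pvMark]
  | cons x L ih =>
    rw [List.pairwise_cons] at hL
    rw [List.foldl_cons]
    cases hbx : pvBTest hm w h x with
    | false =>
      rw [if_neg (by simp [hbx]), List.filter_cons_of_neg (by simp [hbx])]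
      exact ih hL.2 t w st
    | true =>
      rw [if_pos (by simp [hbx]), List.filter_cons_of_pos (by simp [hbx])]
      obtain ⟨hx1, hx2⟩ := pvBTest_nonneg hm w h x hbx
      have hfc : L.filter (pvBTest hm (pvSetv w x.1 x.2) h) = L.filter (pvBTest hm w h) := by
        apply List.filter_congr
        intro y hy
        apply pvBTest_congr
        intro hy1 hy2
        refine pvGet2_setv_ne w x.1 x.2 y.1 y.2 hx1 hx2 hy1 hy2 ?_
        have hne2 := hL.1 y hy
        simp only [ne_eq, Prod.ext_iff] at hne2 ⊢
        intro hc
        exact hne2 ⟨hc.1.symm, hc.2.symm⟩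
      rw [ih hL.2 (t + 1) (pvSetv w x.1 x.2) (x :: st), hfc]
      rw [pvMark_cons]
      refine congrArg₂ _ ?_ rfl
      simp only [List.length_cons]
      push_cast
      ring

-- A's neighbour order; B scans the reversed list so that LIFO popping follows A's order
def pvT (p : Int × Int) : List (Int × Int) :=
  [(p.1 - 1, p.2), (p.1, p.2 - 1), (p.1, p.2 + 1), (p.1 + 1, p.2)]

-- the cells both programs accept at p, in A's order
def pvBV (hm v : List (List Int)) (p : Int × Int) : List (Int × Int) :=
  (pvT p).filter (pvBTest hm v (pvGet2 hm p.1 p.2))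

-- A's two filter passes equal B's single test
theorem pvFILT (hm w : List (List Int)) (p : Int × Int) :
    (findUnvisitedNeighbors hm w p).filter (fun n =>
      if pvGet2 hm n.1 n.2 == 9 then false
      else if pvGet2 hm n.1 n.2 < pvGet2 hm p.1 p.2 then false
      else true)
    = pvBV hm w p := by
  unfold findUnvisitedNeighbors pvBV pvT
  rw [List.filter_filter]
  apply List.filter_congr
  intro n _
  rw [Bool.eq_iff_iff]
  simp only [pvBTest, Bool.and_eq_true, decide_eq_true_eq, Bool.not_eq_true',
    beq_eq_false_iff_ne, ne_eq, beq_iff_eq]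
  split_ifs with h1 h2 h3 h4 h5 <;>
    simp_all only [Bool.or_eq_true, decide_eq_true_eq, Bool.and_eq_true, Bool.not_eq_true',
      beq_eq_false_iff_ne, ne_eq, beq_iff_eq, not_or, Bool.false_eq_true, false_iff,
      Bool.true_eq_false, true_iff] <;>
    simp_all <;> omega

def pvValid (hm v : List (List Int)) (p : Int × Int) : List (Int × Int) :=
  (findUnvisitedNeighbors hm v p).filter (fun n =>
    if pvGet2 hm n.1 n.2 == 9 then false
    else if pvGet2 hm n.1 n.2 < pvGet2 hm p.1 p.2 then false
    else true)

theorem pvValid_eq (hm w : List (List Int)) (p : Int × Int) :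
    pvValid hm w p = pvBV hm w p := pvFILT hm w p

theorem chnA_succ (f : Nat) (hm v : List (List Int)) (p : Int × Int) :
    chnA (f + 1) hm v p =
      if (pvValid hm v p).isEmpty then (0, v)
      else (pvValid hm v p).foldl (fun acc n => let r := chnA f hm acc.2 n; (acc.1 + r.1, r.2))
        (((pvValid hm v p).length : Int), pvMark (pvValid hm v p) v) := rfl

theorem pvBV_mem_test (hm w : List (List Int)) (p : Int × Int) :
    ∀ q ∈ pvBV hm w p, pvBTest hm w (pvGet2 hm p.1 p.2) q = true := by
  intro q hq
  exact List.of_mem_filter hq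

theorem pvBV_pairwise (hm w : List (List Int)) (p : Int × Int) :
    (pvBV hm w p).Pairwise (· ≠ ·) :=
  (pvT_pairwise p).filter _

theorem pvBV_mark (hm w : List (List Int)) (p : Int × Int) (hs : pvShape hm w) :
    pvMu (pvMark (pvBV hm w p) w) + (pvBV hm w p).length ≤ pvMu w :=
  pvMu_mark_le_of_all hm w _ _ (pvBV_mem_test hm w p) (pvBV_pairwise hm w p) hs

theorem chnA_mu (f : Nat) : ∀ (hm w : List (List Int)) (p : Int × Int),
    pvMu (chnA f hm w p).2 ≤ pvMu w := by
  induction f with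
  | zero => intro hm w p; exact le_refl _
  | succ f ih =>
    intro hm w p
    rw [chnA_succ]
    split
    · exact le_refl _
    · have aux : ∀ (qs : List (Int × Int)) (acc : Int × List (List Int)),
          pvMu acc.2 ≤ pvMu w →
          pvMu ((qs.foldl (fun acc n => let r := chnA f hm acc.2 n; (acc.1 + r.1, r.2)) acc)).2
            ≤ pvMu w := by
        intro qs
        induction qs with
        | nil => intro acc hacc; exact hacc
        | cons q qs ih2 =>
          intro acc hacc
          simp only [List.foldl_cons]
          exact ih2 _ (le_trans (ih hm acc.2 q) hacc)
      exact aux _ _ (pvMu_mark_le _ _)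

theorem chnA_shape (f : Nat) : ∀ (hm w : List (List Int)) (p : Int × Int), pvShape hm w →
    pvShape hm (chnA f hm w p).2 := by
  induction f with
  | zero => intro hm w p hs; exact hs
  | succ f ih =>
    intro hm w p hs
    rw [chnA_succ]
    split
    · exact hs
    · have aux : ∀ (qs : List (Int × Int)) (acc : Int × List (List Int)),
          pvShape hm acc.2 →
          pvShape hm ((qs.foldl (fun acc n => let r := chnA f hm acc.2 n; (acc.1 + r.1, r.2)) acc)).2 := by
        intro qs
        induction qs with
        | nil => intro acc hacc; exact hacc
        | cons q qs ih2 =>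
          intro acc hacc
          simp only [List.foldl_cons]
          exact ih2 _ (ih hm acc.2 q hacc)
      exact aux _ _ (pvShape_mark hm w _ hs)

-- fuel stability of A's recursion
theorem chnA_fuel : ∀ (n : Nat) (w : List (List Int)), pvMu w ≤ n →
    ∀ (hm : List (List Int)) (p : Int × Int) (f g : Nat), pvShape hm w →
    pvMu w < f → pvMu w < g → chnA f hm w p = chnA g hm w p := by
  intro n
  induction n using Nat.strong_induction_on with
  | _ n IH =>
    intro w hw hm p f g hs hf hg
    obtain ⟨f', rfl⟩ : ∃ f', f = f' + 1 := ⟨f - 1, by omega⟩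
    obtain ⟨g', rfl⟩ : ∃ g', g = g' + 1 := ⟨g - 1, by omega⟩
    rw [chnA_succ, chnA_succ]
    by_cases he : (pvValid hm w p).isEmpty
    · rw [if_pos he, if_pos he]
    · rw [if_neg he, if_neg he]
      have hne : pvValid hm w p ≠ [] := by simpa [List.isEmpty_iff] using he
      have hlen1 : 1 ≤ (pvValid hm w p).length := List.length_pos_iff.mpr hne
      have hmark := pvBV_mark hm w p hs
      rw [pvValid_eq] at *
      have hv1 : pvMu (pvMark (pvBV hm w p) w) < pvMu w := by omega
      have aux : ∀ (qs : List (Int × Int)) (acc : Int × List (List Int)),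
          pvMu acc.2 ≤ pvMu (pvMark (pvBV hm w p) w) → pvShape hm acc.2 →
          qs.foldl (fun acc n => let r := chnA f' hm acc.2 n; (acc.1 + r.1, r.2)) acc
            = qs.foldl (fun acc n => let r := chnA g' hm acc.2 n; (acc.1 + r.1, r.2)) acc := by
        intro qs
        induction qs with
        | nil => intro acc _ _; rfl
        | cons q qs ih2 =>
          intro acc hacc hsacc
          simp only [List.foldl_cons]
          have hEq : chnA f' hm acc.2 q = chnA g' hm acc.2 q :=
            IH (pvMu acc.2) (by omega) acc.2 (le_refl _) hm q f' g' hsacc (by omega) (by omega)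
          rw [hEq]
          exact ih2 _ (le_trans (chnA_mu g' hm acc.2 q) hacc) (chnA_shape g' hm acc.2 q hsacc)
      exact aux _ _ (le_refl _) (pvShape_mark hm w _ hs)

theorem chnB_nil (f : Nat) (hm : List (List Int)) (t : Int) (w : List (List Int)) :
    chnB f hm t w [] = t := by
  cases f <;> rfl

-- one iteration of B's loop, in closed form
theorem chnB_step (f : Nat) (hm : List (List Int)) (t : Int) (v : List (List Int))
    (cur : Int × Int) (rest : List (Int × Int)) :
    chnB (f + 1) hm t v (cur :: rest)
      = chnB f hm (t + ((pvBV hm v cur).length : Int)) (pvMark (pvBV hm v cur) v)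
          (pvBV hm v cur ++ rest) := by
  have hstep : chnB (f + 1) hm t v (cur :: rest)
      = chnB f hm
          ((((pvT cur).reverse).foldl (fun (s : Int × List (List Int) × List (Int × Int)) nb =>
            if pvBTest hm s.2.1 (pvGet2 hm cur.1 cur.2) nb then
              (s.1 + 1, pvSetv s.2.1 nb.1 nb.2, nb :: s.2.2) else s) (t, v, rest))).1
          ((((pvT cur).reverse).foldl (fun (s : Int × List (List Int) × List (Int × Int)) nb =>
            if pvBTest hm s.2.1 (pvGet2 hm cur.1 cur.2) nb then
              (s.1 + 1, pvSetv s.2.1 nb.1 nb.2, nb :: s.2.2) else s) (t, v, rest))).2.1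
          ((((pvT cur).reverse).foldl (fun (s : Int × List (List Int) × List (Int × Int)) nb =>
            if pvBTest hm s.2.1 (pvGet2 hm cur.1 cur.2) nb then
              (s.1 + 1, pvSetv s.2.1 nb.1 nb.2, nb :: s.2.2) else s) (t, v, rest))).2.2 := rfl
  rw [hstep, pvGVAL hm (pvGet2 hm cur.1 cur.2) (pvT cur).reverse
    (List.pairwise_reverse.mpr ((pvT_pairwise cur).imp (fun h => Ne.symm h))) t v rest,
    List.filter_reverse, List.length_reverse, pvMark_reverse, List.reverseAux_eq,
    List.reverse_reverse]
  rfl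

-- fuel stability of B's loop
theorem chnB_fuel : ∀ (n : Nat) (w : List (List Int)) (st : List (Int × Int)),
    pvMu w + st.length ≤ n →
    ∀ (hm : List (List Int)) (t : Int) (f g : Nat), pvShape hm w →
    pvMu w + st.length ≤ f → pvMu w + st.length ≤ g →
    chnB f hm t w st = chnB g hm t w st := by
  intro n
  induction n using Nat.strong_induction_on with
  | _ n IH =>
    intro w st hn hm t f g hs hf hg
    match st with
    | [] => rw [chnB_nil, chnB_nil]
    | cur :: rest =>
      simp only [List.length_cons] at hn hf hg
      obtain ⟨f', rfl⟩ : ∃ f', f = f' + 1 := ⟨f - 1, by omega⟩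
      obtain ⟨g', rfl⟩ : ∃ g', g = g' + 1 := ⟨g - 1, by omega⟩
      rw [chnB_step, chnB_step]
      have hmark := pvBV_mark hm w cur hs
      have hlen : (pvBV hm w cur ++ rest).length = (pvBV hm w cur).length + rest.length := by
        simp
      apply IH (n - 1) (by omega)
      · rw [hlen]; omega
      · exact pvShape_mark hm w _ hs
      · rw [hlen]; omega
      · rw [hlen]; omega

-- the simulation: one recursive call of A = B's loop until A's subtree is exhausted
theorem pvMAIN : ∀ (n : Nat) (w : List (List Int)), pvMu w ≤ n →
    ∀ (hm : List (List Int)) (p : Int × Int) (st : List (Int × Int)) (t : Int) (g : Nat),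
    pvShape hm w → pvMu w + 1 + st.length ≤ g →
    chnB g hm t w (p :: st)
      = chnB (pvMu (chnA (pvMu w + 1) hm w p).2 + st.length) hm
          (t + (chnA (pvMu w + 1) hm w p).1) (chnA (pvMu w + 1) hm w p).2 st := by
  intro n
  induction n using Nat.strong_induction_on with
  | _ n IH =>
    intro w hw hm p st t g hs hg
    obtain ⟨g', rfl⟩ : ∃ g', g = g' + 1 := ⟨g - 1, by omega⟩
    rw [chnB_step, chnA_succ, pvValid_eq]
    by_cases he : (pvBV hm w p).isEmpty
    · have hnil : pvBV hm w p = [] := by simpa [List.isEmpty_iff] using he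
      rw [if_pos (by simp [he]), hnil]
      simp only [List.length_nil, Nat.cast_zero, Int.add_zero, List.nil_append]
      exact chnB_fuel (pvMu w + st.length) w st (le_refl _) hm t g' _ hs (by omega) (le_refl _)
    · rw [if_neg (by simp [he])]
      have hne : pvBV hm w p ≠ [] := by simpa [List.isEmpty_iff] using he
      have hlen1 : 1 ≤ (pvBV hm w p).length := List.length_pos_iff.mpr hne
      have hmark := pvBV_mark hm w p hs
      have hv1lt : pvMu (pvMark (pvBV hm w p) w) < pvMu w := by omega
      have hshape1 : pvShape hm (pvMark (pvBV hm w p) w) := pvShape_mark hm w _ hs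
      -- canonicalize the fuel on the left
      rw [chnB_fuel (pvMu w + st.length) (pvMark (pvBV hm w p) w) (pvBV hm w p ++ st)
        (by simp only [List.length_append]; omega) hm _ g'
        (pvMu (pvMark (pvBV hm w p) w) + (pvBV hm w p ++ st).length)
        hshape1 (by simp only [List.length_append]; omega)
        (by simp only [List.length_append]; omega)]
      -- inner induction over the accepted list
      have inner : ∀ (qs : List (Int × Int)) (W : List (List Int)) (T : Int),
          pvShape hm W → pvMu W < pvMu w →
          chnB (pvMu W + (qs ++ st).length) hm T W (qs ++ st)
            = chnB (pvMu ((qs.foldl (fun acc n => let r := chnA (pvMu w) hm acc.2 n;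
                  (acc.1 + r.1, r.2)) ((T : Int), W))).2 + st.length) hm
                ((qs.foldl (fun acc n => let r := chnA (pvMu w) hm acc.2 n;
                  (acc.1 + r.1, r.2)) ((T : Int), W))).1
                ((qs.foldl (fun acc n => let r := chnA (pvMu w) hm acc.2 n;
                  (acc.1 + r.1, r.2)) ((T : Int), W))).2 st := by
        intro qs
        induction qs with
        | nil => intro W T hsW hWlt; rfl
        | cons q qs ih2 =>
          intro W T hsW hWlt
          have hfuel : chnA (pvMu w) hm W q = chnA (pvMu W + 1) hm W q :=
            chnA_fuel (pvMu W) W (le_refl _) hm q (pvMu w) (pvMu W + 1) hsW (by omega) (by omega)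
          have hstep := IH (pvMu W) (by omega) W (le_refl _) hm q (qs ++ st) T
            (pvMu W + 1 + (qs ++ st).length) hsW (le_refl _)
          simp only [List.cons_append, List.length_cons] at *
          have harith : pvMu W + ((qs ++ st).length + 1) = pvMu W + 1 + (qs ++ st).length := by
            omega
          rw [harith, hstep]
          simp only [List.foldl_cons, hfuel]
          exact ih2 (chnA (pvMu W + 1) hm W q).2 (T + (chnA (pvMu W + 1) hm W q).1)
            (chnA_shape _ hm W q hsW)
            (lt_of_le_of_lt (chnA_mu _ hm W q) hWlt)
      rw [inner (pvBV hm w p) (pvMark (pvBV hm w p) w)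
        (t + ((pvBV hm w p).length : Int)) hshape1 hv1lt]
      -- additivity of the accumulated count in the fold
      have hadd : ∀ (qs : List (Int × Int)) (a b : Int) (W : List (List Int)),
          qs.foldl (fun acc n => let r := chnA (pvMu w) hm acc.2 n; (acc.1 + r.1, r.2)) (a + b, W)
            = (a + (qs.foldl (fun acc n => let r := chnA (pvMu w) hm acc.2 n;
                (acc.1 + r.1, r.2)) (b, W)).1,
               (qs.foldl (fun acc n => let r := chnA (pvMu w) hm acc.2 n;
                (acc.1 + r.1, r.2)) (b, W)).2) := by
        intro qs
        induction qs with
        | nil => intro a b W; rfl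
        | cons q qs ih2 =>
          intro a b W
          simp only [List.foldl_cons]
          rw [Int.add_assoc, ih2]
      rw [hadd]

-- ===== VERDICT (by name: the statement is the Claim_ definition above) =====
theorem countHigherNeighbors_spec : Claim_equal_countHigherNeighbors := by
  intro hm v pt _ hpre
  unfold Spec_countHigherNeighbors countHigherNeighbors countHigherNeighbors_alt
  have hs : pvShape hm v := ⟨hpre.2.2.2.1, hpre.2.2.2.2.1⟩
  rw [pvMAIN (pvMu v) v (le_refl _) hm
    ((PySem.List.pyGet? pt 0).getD 0, (PySem.List.pyGet? pt 1).getD 0) [] 0 (pvMu v + 1) hs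
    (by simp)]
  rw [chnB_nil, Int.zero_add]
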